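-- pv_equiv track=rewrite | github.com/taraak/pita | pita/src/utils/seq_to_pdb.py | translate_1letter_to_3letter
-- ===== SOURCE A (Python) =====
-- aa_321 = {
--     "A": "ALA",
--     "C": "CYS",
--     "D": "ASP",
--     "E": "GLU",
--     "F": "PHE",
--     "G": "GLY",
--     "H": "HIS",
--     "I": "ILE",
--     "K": "LYS",
--     "L": "LEU",
--     "M": "MET",
--     "N": "ASN",
--     "P": "PRO",
--     "Q": "GLN",
--     "R": "ARG",
--     "S": "SER",
--     "T": "THR",
--     "V": "VAL",
--     "W": "TRP",
--     "Y": "TYR",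
-- }
--
-- def translate_1letter_to_3letter(one_letter_seq, zwitter_ion=True):
--     """Generate 3 letter sequence with 1-letter seq.
--     If `zwitter_ion`, adding N and C terminal special label for zwitter ion form.
--     """
--     three_letter_seq = []
--     for i, one_letter in enumerate(one_letter_seq):
--         my_res_name = aa_321[one_letter]
--         if zwitter_ion:
--             if i == 0:
--                 my_res_name = "N" + my_res_name
--             elif i == len(one_letter_seq) - 1:
--                 my_res_name = "C" + my_res_name
--         three_letter_seq.append(my_res_name)
--     return three_letter_seq
-- ===== SOURCE B (Python) =====
-- aa_321 = {
--     "A": "ALA", "C": "CYS", "D": "ASP", "E": "GLU", "F": "PHE",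
--     "G": "GLY", "H": "HIS", "I": "ILE", "K": "LYS", "L": "LEU",
--     "M": "MET", "N": "ASN", "P": "PRO", "Q": "GLN", "R": "ARG",
--     "S": "SER", "T": "THR", "V": "VAL", "W": "TRP", "Y": "TYR",
-- }
--
-- def translate_1letter_to_3letter(one_letter_seq, zwitter_ion=True):
--     """Assemble the answer as three independent segments (N-terminal residue,
--     interior slice, C-terminal residue) and concatenate them; no per-element
--     index branching at all."""
--     if not zwitter_ion:
--         return [aa_321[c] for c in one_letter_seq]
--     if len(one_letter_seq) == 0:
--         return []
--     if len(one_letter_seq) == 1: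
--         return ["N" + aa_321[one_letter_seq[0]]]
--     return (["N" + aa_321[one_letter_seq[0]]]
--             + [aa_321[c] for c in one_letter_seq[1:-1]]
--             + ["C" + aa_321[one_letter_seq[-1]]])
-- ===== Notes on version B (the rewrite author's own statement) =====
-- stated objective: alternative
-- what changed: Instead of one indexed loop that tests each position against 0 and len-1, B does explicit case analysis on the length and concatenates three independently built segments: the N-prefixed first residue, a plain map over the interior slice seq[1:-1], and the C-prefixed last residue.
import Mathlib
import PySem

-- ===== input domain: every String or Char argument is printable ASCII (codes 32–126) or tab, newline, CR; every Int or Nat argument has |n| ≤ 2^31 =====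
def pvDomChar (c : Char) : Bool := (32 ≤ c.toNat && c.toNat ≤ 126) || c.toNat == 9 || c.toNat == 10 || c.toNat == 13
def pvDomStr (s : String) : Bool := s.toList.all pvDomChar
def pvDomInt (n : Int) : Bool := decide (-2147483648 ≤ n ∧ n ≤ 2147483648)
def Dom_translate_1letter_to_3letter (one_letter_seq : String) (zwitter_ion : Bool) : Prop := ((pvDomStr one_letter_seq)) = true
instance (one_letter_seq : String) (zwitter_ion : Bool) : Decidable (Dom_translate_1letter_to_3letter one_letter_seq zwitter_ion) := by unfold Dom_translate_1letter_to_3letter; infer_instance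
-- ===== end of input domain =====

-- B replaces A's indexed loop with per-position terminal tests by a length case split that
-- concatenates three independently built segments (N-first, interior slice, C-last); objective: alternative.

-- ===== PORT A =====
-- shared module constant aa_321 (a dict keyed by the 1-letter code)
def aa_321 : PySem.Dict String String :=
  PySem.Dict.ofList [("A", "ALA"), ("C", "CYS"), ("D", "ASP"), ("E", "GLU"), ("F", "PHE"),
   ("G", "GLY"), ("H", "HIS"), ("I", "ILE"), ("K", "LYS"), ("L", "LEU"),
   ("M", "MET"), ("N", "ASN"), ("P", "PRO"), ("Q", "GLN"), ("R", "ARG"),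
   ("S", "SER"), ("T", "THR"), ("V", "VAL"), ("W", "TRP"), ("Y", "TYR")]

-- aa_321[c]; KeyError (invalid residue) is excluded by Pre_, so the default "" is never reached inside Pre_
def pvLookup (c : Char) : String := PySem.Dict.getD aa_321 (String.singleton c) ""

def translate_1letter_to_3letter (one_letter_seq : String) (zwitter_ion : Bool) : List String :=
  let cs := one_letter_seq.toList
  let n : Int := cs.length
  (PySem.List.enumerate cs 0).foldl
    (fun acc p =>
      let my_res_name := pvLookup p.2
      let my_res_name :=
        if zwitter_ion then
          if p.1 = 0 then "N" ++ my_res_name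
          else if p.1 = n - 1 then "C" ++ my_res_name
          else my_res_name
        else my_res_name
      acc ++ [my_res_name]) []

-- ===== PORT B =====
def translate_1letter_to_3letter_alt (one_letter_seq : String) (zwitter_ion : Bool) : List String :=
  let cs := one_letter_seq.toList
  if !zwitter_ion then cs.map pvLookup
  else if cs.length = 0 then []
  else if cs.length = 1 then ["N" ++ pvLookup (PySem.List.pyGetD cs 0 ' ')]
  else ["N" ++ pvLookup (PySem.List.pyGetD cs 0 ' ')]
       ++ (PySem.List.slice cs (some 1) (some (-1))).map pvLookup
       ++ ["C" ++ pvLookup (PySem.List.pyGetD cs (-1) ' ')]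

-- ===== PRECONDITION & SPEC =====
-- Pre_ excludes exactly the inputs on which Python A raises KeyError: a character outside the 20 residue letters.
def Pre_translate_1letter_to_3letter (one_letter_seq : String) (zwitter_ion : Bool) : Prop :=
  (one_letter_seq.toList.all (fun c =>
    ['A','C','D','E','F','G','H','I','K','L','M','N','P','Q','R','S','T','V','W','Y'].contains c)) = true
instance (one_letter_seq : String) (zwitter_ion : Bool) : Decidable (Pre_translate_1letter_to_3letter one_letter_seq zwitter_ion) := by unfold Pre_translate_1letter_to_3letter; infer_instance

def pvWitness_translate_1letter_to_3letter : String × Bool := ("AGY", true)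

def Spec_translate_1letter_to_3letter (one_letter_seq : String) (zwitter_ion : Bool) (out : List String) : Prop := out = translate_1letter_to_3letter_alt one_letter_seq zwitter_ion
instance (one_letter_seq : String) (zwitter_ion : Bool) (out : List String) : Decidable (Spec_translate_1letter_to_3letter one_letter_seq zwitter_ion out) := by unfold Spec_translate_1letter_to_3letter; infer_instance

-- ===== CLAIM (what is proved, stated in full; the proofs are below) =====
def Claim_equal_translate_1letter_to_3letter : Prop := ∀ (one_letter_seq : String) (zwitter_ion : Bool), Dom_translate_1letter_to_3letter one_letter_seq zwitter_ion → Pre_translate_1letter_to_3letter one_letter_seq zwitter_ion → Spec_translate_1letter_to_3letter one_letter_seq zwitter_ion (translate_1letter_to_3letter one_letter_seq zwitter_ion)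

-- ===== LEMMAS AND PROOFS =====

-- seq[1:-1] is tail-then-dropLast
theorem pv_slice_one_neg_one {α : Type} (cs : List α) :
    PySem.List.slice cs (some 1) (some (-1)) = cs.tail.dropLast := by
  cases cs with
  | nil => rfl
  | cons a t =>
    simp [PySem.List.slice, PySem.List.clampIdx, List.dropLast_eq_take]
    split_ifs with h
    · omega
    · omega

-- the tail of A's zwitterion loop (indices ≥ 1) is B's interior segment plus the C-terminal residue
theorem pv_tail_seg (m : Int) :
    ∀ (rest : List Char) (k : Int), 1 ≤ k → m = k + rest.length - 1 →
      (PySem.List.enumerate rest k).map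
        (fun p => if p.1 = 0 then "N" ++ pvLookup p.2
                  else if p.1 = m then "C" ++ pvLookup p.2 else pvLookup p.2)
      = rest.dropLast.map pvLookup ++ (rest.map (fun c => "C" ++ pvLookup c)).drop (rest.length - 1) := by
  intro rest
  induction rest with
  | nil => intro k _ _; simp [PySem.List.enumerate_nil]
  | cons x xs ih =>
    intro k hk hm
    rw [PySem.List.enumerate_cons]
    simp only [List.map_cons]
    have hk0 : ¬ (k = 0) := by omega
    cases xs with
    | nil =>
      have hkm : k = m := by simp at hm; omega
      have hm0 : ¬ m = 0 := by omega
      simp [PySem.List.enumerate_nil, hkm, hm0]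
    | cons y ys =>
      have hkm : ¬ (k = m) := by simp at hm; omega
      rw [if_neg hk0, if_neg hkm, ih (k + 1) (by omega) (by simp at hm ⊢; omega)]
      simp [List.dropLast_cons_of_ne_nil]

theorem translate_eq (s : String) (zw : Bool) :
    translate_1letter_to_3letter s zw = translate_1letter_to_3letter_alt s zw := by
  unfold translate_1letter_to_3letter translate_1letter_to_3letter_alt
  rw [PySem.List.foldl_append_singleton_eq_map]
  cases zw with
  | false =>
    simp only [Bool.false_eq_true, if_false, Bool.not_false, if_true]
    conv_rhs => rw [show s.toList = (PySem.List.enumerate s.toList 0).map (·.2) from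
      (PySem.List.map_snd_enumerate _ _).symm]
    rw [List.map_map]
    rfl
  | true =>
    simp only [if_true, Bool.not_true, Bool.false_eq_true, if_false]
    cases h : s.toList with
    | nil => simp [PySem.List.enumerate_nil]
    | cons c rest =>
      cases rest with
      | nil => simp [PySem.List.enumerate_cons, PySem.List.enumerate_nil]
      | cons x xs =>
        have hlen2 : (c :: x :: xs).length ≠ 0 := by simp
        have hlen1 : (c :: x :: xs).length ≠ 1 := by simp
        rw [if_neg hlen2, if_neg hlen1, pv_slice_one_neg_one,
          PySem.List.pyGetD_zero_cons,
          PySem.List.pyGetD_neg_one (d := ' ') (xs := c :: x :: xs) (by simp)]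
        rw [PySem.List.enumerate_cons, List.map_cons, if_pos rfl]
        simp only [List.nil_append, zero_add, List.tail_cons]
        rw [pv_tail_seg ((((c :: x :: xs).length : Int)) - 1) (x :: xs) 1 (by omega)
          (by simp)]
        have hlm : (x :: xs).length - 1 = ((x :: xs).map (fun c => "C" ++ pvLookup c)).length - 1 := by
          simp
        rw [hlm, List.drop_length_sub_one (by simp), List.getLast_map (by simp)]
        simp [List.getLast_cons]

-- ===== VERDICT (by name: the statement is the Claim_ definition above) =====
theorem translate_1letter_to_3letter_spec : Claim_equal_translate_1letter_to_3letter := by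
  intro s zw _ _
  exact translate_eq s zw
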